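-- pv_equiv track=rewrite | github.com/Shanu171/poc_dummy_datasets_code | model_train.py | years_since_last_claim
-- ===== SOURCE A (Python) =====
-- def years_since_last_claim(x):
--     last = None
--     out = []
--     for _, amt in enumerate(x):
--         if amt > 0:
--             last = 0
--             out.append(0)
--         else:
--             if last is None:
--                 out.append(999)
--             else:
--                 last += 1
--                 out.append(last)
--     return out
-- ===== SOURCE B (Python) =====
-- def years_since_last_claim(x):
--     # pass 1: table of the index of the most recent positive value at or before i
--     last_pos = []
--     prev = None
--     for i, amt in enumerate(x):
--         if amt > 0:
--             prev = i
--         last_pos.append(prev)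
--     # pass 2: map the table to counts
--     return [999 if p is None else i - p for i, p in enumerate(last_pos)]
-- ===== Notes on version B (the rewrite author's own statement) =====
-- stated objective: alternative
-- what changed: Replaces A's single stateful loop with a running counter by two separate passes: first build a table of the index of the most recent positive element, then map each position to its distance from that index (999 when none).
import Mathlib
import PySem

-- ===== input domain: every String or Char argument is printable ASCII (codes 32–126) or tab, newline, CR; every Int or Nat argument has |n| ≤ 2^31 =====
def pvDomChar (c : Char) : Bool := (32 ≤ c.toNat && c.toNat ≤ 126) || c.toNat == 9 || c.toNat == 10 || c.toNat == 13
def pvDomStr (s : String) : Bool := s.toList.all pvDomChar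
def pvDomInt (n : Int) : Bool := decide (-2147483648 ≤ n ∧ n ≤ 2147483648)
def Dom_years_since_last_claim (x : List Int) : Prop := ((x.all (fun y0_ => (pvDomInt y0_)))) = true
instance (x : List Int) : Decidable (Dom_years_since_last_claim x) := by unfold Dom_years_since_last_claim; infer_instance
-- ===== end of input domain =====

-- B rebuilds the result in two separate passes (table of last-positive indices, then a map) instead of A's single stateful counting loop; same values, same cost.


-- ===== PORT A =====
-- loop of A: state 'last' (Option Int), emitting one value per element
def yslcGo : Option Int → List Int → List Int
  | _, [] => []
  | last, amt :: rest =>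
    if amt > 0 then 0 :: yslcGo (some 0) rest
    else
      match last with
      | none => 999 :: yslcGo none rest
      | some l => (l + 1) :: yslcGo (some (l + 1)) rest

def years_since_last_claim (x : List Int) : List Int := yslcGo none x

-- ===== PORT B =====
-- B, pass 1: table last_pos[i] = index of most recent positive value at or before i
def yslcBuildLP : Int → Option Int → List Int → List (Option Int)
  | _, _, [] => []
  | i, prev, amt :: rest =>
    let p := if amt > 0 then some i else prev
    p :: yslcBuildLP (i + 1) p rest

-- B, pass 2: map position/table-entry to the count
def yslcMapLP : Int → List (Option Int) → List Int
  | _, [] => []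
  | i, p :: rest => (match p with | none => 999 | some q => i - q) :: yslcMapLP (i + 1) rest

def years_since_last_claim_alt (x : List Int) : List Int := yslcMapLP 0 (yslcBuildLP 0 none x)

-- ===== PRECONDITION & SPEC =====
def Spec_years_since_last_claim (x : List Int) (out : List Int) : Prop := out = years_since_last_claim_alt x
instance (x : List Int) (out : List Int) : Decidable (Spec_years_since_last_claim x out) := by unfold Spec_years_since_last_claim; infer_instance

-- ===== CLAIM (what is proved, stated in full; the proofs are below) =====
def Claim_equal_years_since_last_claim : Prop := ∀ (x : List Int), Dom_years_since_last_claim x → Spec_years_since_last_claim x (years_since_last_claim x)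

-- ===== LEMMAS AND PROOFS =====

-- ===== VERDICT (by name: the statement is the Claim_ definition above) =====
theorem yslc_key : ∀ (x : List Int) (i : Int) (prev : Option Int),
    yslcGo (prev.map (fun p => i - 1 - p)) x = yslcMapLP i (yslcBuildLP i prev x) := by
  intro x
  induction x with
  | nil => intro i prev; rfl
  | cons amt rest ih =>
    intro i prev
    by_cases h : amt > 0
    · simp [yslcGo, yslcBuildLP, yslcMapLP, h]
      have := ih (i + 1) (some i)
      simpa using this
    · cases prev with
      | none =>
        simp [yslcGo, yslcBuildLP, yslcMapLP, h]
        have := ih (i + 1) none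
        simpa using this
      | some p =>
        simp [yslcGo, yslcBuildLP, yslcMapLP, h]
        have := ih (i + 1) (some p)
        constructor
        · omega
        · have e : i - 1 - p + 1 = i + 1 - 1 - p := by omega
          rw [e]
          simpa using this

theorem years_since_last_claim_spec : Claim_equal_years_since_last_claim := by
  intro x _
  unfold Spec_years_since_last_claim years_since_last_claim years_since_last_claim_alt
  have := yslc_key x 0 none
  simpa using this
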